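-- pv_equiv track=rewrite | github.com/LysanderGG/AdventOfCode2017 | AdventOfCode2017/day03.py | generate
-- ===== SOURCE A (Python) =====
-- from enum import Enum
--
-- class Direction(Enum):
-- 	LEFT = (-1, 0)
-- 	RIGHT = (1, 0)
-- 	TOP = (0, 1)
-- 	BOT = (0, -1)
--
-- def next_dir(d):
-- 	next_direction = {
-- 		Direction.LEFT: Direction.BOT,
-- 		Direction.BOT: Direction.RIGHT,
-- 		Direction.RIGHT: Direction.TOP,
-- 		Direction.TOP: Direction.LEFT,
-- 	}
--
-- 	return next_direction[d]
--
-- def generate(max):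
-- 	l = {}
-- 	c = (0, 0)
-- 	dir = Direction.RIGHT
-- 	go_top_next = False
--
-- 	for i in range(1, max+1):
-- 		l[i] = c
-- 		if go_top_next:
-- 			dir = Direction.TOP
-- 			go_top_next = False
-- 		elif abs(c[0]) == abs(c[1]):
-- 			if dir == Direction.RIGHT:
-- 				go_top_next = True
-- 			else:
-- 				dir = next_dir(dir)
--
-- 		c = (c[0] + dir.value[0], c[1] + dir.value[1])
--
-- 	return l
-- ===== SOURCE B (Python) =====
-- def generate(max):
-- 	# Segment-based spiral: directions cycle R,U,L,D with lengths 1,1,2,2,3,3,...;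
-- 	# each segment's entries are produced in bulk from its start point.
-- 	l = {}
-- 	dirs = [(1, 0), (0, 1), (-1, 0), (0, -1)]
-- 	i = 0          # entries emitted so far
-- 	k = 0          # segment index
-- 	x, y = 0, 0    # start point of segment k
-- 	while i < max:
-- 		dx, dy = dirs[k % 4]
-- 		length = k // 2 + 1
-- 		n = min(length, max - i)
-- 		for s in range(n):
-- 			l[i + s + 1] = (x + s * dx, y + s * dy)
-- 		x += length * dx
-- 		y += length * dy
-- 		i += n
-- 		k += 1
-- 	return l
-- ===== Notes on version B (the rewrite author's own statement) =====
-- stated objective: faster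
-- what changed: Replaces A's per-entry state machine (corner test abs(x)==abs(y), direction enum and go_top_next flag updated at every index) with direct segment-wise generation: the spiral is emitted as straight runs whose lengths repeat each successive integer twice, with directions cycling right-up-left-down, each run's entries computed in bulk from its start point.
import Mathlib
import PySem

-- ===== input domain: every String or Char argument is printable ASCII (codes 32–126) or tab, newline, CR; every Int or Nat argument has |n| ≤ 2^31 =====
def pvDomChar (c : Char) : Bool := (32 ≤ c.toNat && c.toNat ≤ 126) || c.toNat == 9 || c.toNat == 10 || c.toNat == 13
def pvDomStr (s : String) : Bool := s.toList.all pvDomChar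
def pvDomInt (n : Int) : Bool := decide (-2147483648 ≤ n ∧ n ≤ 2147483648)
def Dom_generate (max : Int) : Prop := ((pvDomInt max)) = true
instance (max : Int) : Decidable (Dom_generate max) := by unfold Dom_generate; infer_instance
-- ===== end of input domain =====

-- B generates the spiral segment by segment (straight runs whose lengths repeat each successive
-- integer twice, directions cycling right-up-left-down, each run's entries produced in bulk from
-- its start point) instead of A's per-entry corner/flag state machine; measurably faster by a
-- constant factor (no per-entry branch/flag work), same O(max) entries.

-- ===== PORT A =====
inductive Direction | LEFT | RIGHT | TOP | BOT
deriving DecidableEq, Repr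

-- the payloads of the Python enum members
def Direction.value : Direction → Int × Int
  | .LEFT => (-1, 0)
  | .RIGHT => (1, 0)
  | .TOP => (0, 1)
  | .BOT => (0, -1)

-- next_dir's dict literal keyed by the four enum members, looked up at d, is exactly this match
def next_dir (d : Direction) : Direction :=
  match d with
  | .LEFT => .BOT
  | .BOT => .RIGHT
  | .RIGHT => .TOP
  | .TOP => .LEFT

-- the body of A's for-loop
def generateStep (st : PySem.Dict Int (Int × Int) × (Int × Int) × Direction × Bool) (i : Int) :
    PySem.Dict Int (Int × Int) × (Int × Int) × Direction × Bool :=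
  let l := st.1
  let c := st.2.1
  let dir := st.2.2.1
  let go_top_next := st.2.2.2
  let l := l.insert i c
  let dg : Direction × Bool :=
    if go_top_next then (Direction.TOP, false)
    else if c.1.natAbs = c.2.natAbs then
      (if dir = Direction.RIGHT then (dir, true) else (next_dir dir, false))
    else (dir, go_top_next)
  (l, (c.1 + dg.1.value.1, c.2 + dg.1.value.2), dg.1, dg.2)

def generate (max : Int) : List (Int × Int × Int) :=
  ((PySem.List.pyRange 1 (max + 1) 1).foldl generateStep
    (PySem.Dict.empty, (0, 0), Direction.RIGHT, false)).1.items

-- ===== PORT B =====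
def dirsB : List (Int × Int) := [(1, 0), (0, 1), (-1, 0), (0, -1)]

-- B's while-loop (i = entries emitted, k = segment index, (x, y) = start point of segment k)
def bLoop (max : Int) (l : PySem.Dict Int (Int × Int)) (i k : Nat) (x y : Int) :
    PySem.Dict Int (Int × Int) :=
  if _h : (i : Int) < max then
    let dxy := dirsB[k % 4]!
    let length := k / 2 + 1
    let n := min length (max - (i : Int)).toNat
    let l' := (List.range n).foldl
      (fun (l : PySem.Dict Int (Int × Int)) (s : Nat) =>
        l.insert ((i : Int) + (s : Int) + 1) (x + (s : Int) * dxy.1, y + (s : Int) * dxy.2)) l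
    bLoop max l' (i + n) (k + 1) (x + (length : Int) * dxy.1) (y + (length : Int) * dxy.2)
  else l
termination_by (max - (i : Int)).toNat
decreasing_by
  have h1 : 1 ≤ min (k / 2 + 1) (max - (i : Int)).toNat := by omega
  omega

def generate_alt (max : Int) : List (Int × Int × Int) :=
  (bLoop max PySem.Dict.empty 0 0 0 0).items

-- ===== PRECONDITION & SPEC =====
def Spec_generate (max : Int) (out : List (Int × Int × Int)) : Prop := out = generate_alt max
instance (max : Int) (out : List (Int × Int × Int)) : Decidable (Spec_generate max out) := by unfold Spec_generate; infer_instance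

-- ===== CLAIM (what is proved, stated in full; the proofs are below) =====
def Claim_equal_generate : Prop := ∀ (max : Int), Dom_generate max → Spec_generate max (generate max)

-- ===== LEMMAS AND PROOFS =====

-- direction vector of segment k (k % 4 ∈ {0,1,2,3} = R,U,L,D)
def vec (m : Nat) : Int × Int :=
  if m = 0 then (1, 0) else if m = 1 then (0, 1) else if m = 2 then (-1, 0) else (0, -1)

def dirOf (m : Nat) : Direction :=
  if m = 0 then .RIGHT else if m = 1 then .TOP else if m = 2 then .LEFT else .BOT

def segLen (k : Nat) : Nat := k / 2 + 1

-- start point of segment k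
def segStart (k : Nat) : Int × Int :=
  let r : Int := (k / 4 : Nat)
  if k % 4 = 0 then (-r, -r)
  else if k % 4 = 1 then (r + 1, -r)
  else if k % 4 = 2 then (r + 1, r + 1)
  else (-r - 1, r + 1)

-- position at offset s of segment k (0 ≤ s ≤ segLen k)
def posOf (k s : Nat) : Int × Int :=
  ((segStart k).1 + (s : Int) * (vec (k % 4)).1, (segStart k).2 + (s : Int) * (vec (k % 4)).2)

-- A's (dir, go_top_next) state before processing the entry at offset s of segment k
def stAt (k s : Nat) : Direction × Bool :=
  if s = 0 then
    (if k = 0 then .RIGHT else dirOf ((k - 1) % 4), decide (k % 4 = 1))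
  else (dirOf (k % 4), false)

def idx (i0 : Int) (n : Nat) : List Int := (List.range n).map (fun (j : Nat) => i0 + (j : Int))

def ents (k s : Nat) (i0 : Int) (n : Nat) : List (Int × (Int × Int)) :=
  (List.range n).map (fun (j : Nat) => (i0 + (j : Int), posOf k (s + j)))

def insRun (l : PySem.Dict Int (Int × Int)) (es : List (Int × (Int × Int))) :
    PySem.Dict Int (Int × Int) := es.foldl (fun l e => l.insert e.1 e.2) l

lemma segStart_succ (k : Nat) : segStart (k + 1) = posOf k (segLen k) := by
  have h4 : k % 4 = 0 ∨ k % 4 = 1 ∨ k % 4 = 2 ∨ k % 4 = 3 := by omega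
  obtain h | h | h | h := h4 <;>
  · have e1 : (k + 1) % 4 = (k % 4 + 1) % 4 := by omega
    have e2 : (k + 1) / 4 = if k % 4 = 3 then k / 4 + 1 else k / 4 := by split_ifs <;> omega
    have e3 : k / 2 = 2 * (k / 4) + k % 4 / 2 := by omega
    simp [segStart, posOf, vec, segLen, h, e1, e2, e3, Prod.ext_iff]
    all_goals omega

set_option maxHeartbeats 1000000 in
lemma entry_step (k s : Nat) (hs : s < segLen k) (l : PySem.Dict Int (Int × Int)) (i : Int) :
    generateStep (l, posOf k s, (stAt k s).1, (stAt k s).2) i =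
      (l.insert i (posOf k s),
       posOf (if s + 1 < segLen k then k else k + 1) (if s + 1 < segLen k then s + 1 else 0),
       (stAt (if s + 1 < segLen k then k else k + 1) (if s + 1 < segLen k then s + 1 else 0)).1,
       (stAt (if s + 1 < segLen k then k else k + 1) (if s + 1 < segLen k then s + 1 else 0)).2) := by
  have h4 : k % 4 = 0 ∨ k % 4 = 1 ∨ k % 4 = 2 ∨ k % 4 = 3 := by omega
  by_cases hs0 : s = 0
  · subst hs0
    by_cases hk0 : k = 0
    · subst hk0
      simp [generateStep, stAt, posOf, segStart, vec, dirOf, next_dir, Direction.value, segLen,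
        Prod.mk.injEq]
    · obtain h | h | h | h := h4
      · -- RIGHT segment start (k ≥ 4, entered from a BOT segment, at a corner)
        have f0 : (k - 1) % 4 = 3 := by omega
        have hst : stAt k 0 = (Direction.BOT, false) := by
          simp [stAt, dirOf, hk0, h, f0]
        have hst1 : stAt k 1 = (Direction.RIGHT, false) := by simp [stAt, dirOf, h]
        have hlt1 : 1 < segLen k := by unfold segLen; omega
        rw [hst]
        simp [generateStep, posOf, segStart, vec, next_dir, Direction.value, h, hlt1, hst1,
          Prod.mk.injEq]
        all_goals try split_ifs
        all_goals simp_all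
        all_goals omega
      · -- TOP segment start (go_top_next is set)
        have f0 : (k - 1) % 4 = 0 := by omega
        have hst : stAt k 0 = (Direction.RIGHT, true) := by
          simp [stAt, dirOf, hk0, h, f0]
        by_cases hk1 : k = 1
        · subst hk1
          rw [hst]
          simp [generateStep, stAt, posOf, segStart, vec, dirOf, next_dir, Direction.value, segLen,
            Prod.mk.injEq]
        · have hst1 : stAt k 1 = (Direction.TOP, false) := by simp [stAt, dirOf, h]
          have hlt1 : 1 < segLen k := by unfold segLen; omega
          rw [hst]
          simp [generateStep, posOf, segStart, vec, next_dir, Direction.value, h, hlt1, hst1,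
            Prod.mk.injEq]
          all_goals try split_ifs
          all_goals simp_all
          all_goals omega
      · -- LEFT segment start (entered from a TOP segment, at a corner)
        have f0 : (k - 1) % 4 = 1 := by omega
        have hst : stAt k 0 = (Direction.TOP, false) := by
          simp [stAt, dirOf, hk0, h, f0]
        have hst1 : stAt k 1 = (Direction.LEFT, false) := by simp [stAt, dirOf, h]
        have hlt1 : 1 < segLen k := by unfold segLen; omega
        rw [hst]
        simp [generateStep, posOf, segStart, vec, next_dir, Direction.value, h, hlt1, hst1,
          Prod.mk.injEq]
        all_goals try split_ifs
        all_goals simp_all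
        all_goals omega
      · -- BOT segment start (entered from a LEFT segment, at a corner)
        have f0 : (k - 1) % 4 = 2 := by omega
        have hst : stAt k 0 = (Direction.LEFT, false) := by
          simp [stAt, dirOf, hk0, h, f0]
        have hst1 : stAt k 1 = (Direction.BOT, false) := by simp [stAt, dirOf, h]
        have hlt1 : 1 < segLen k := by unfold segLen; omega
        rw [hst]
        simp [generateStep, posOf, segStart, vec, next_dir, Direction.value, h, hlt1, hst1,
          Prod.mk.injEq]
        all_goals try split_ifs
        all_goals simp_all
        all_goals omega
  · -- s ≥ 1: inside a segment
    obtain h | h | h | h := h4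
    · have hst : stAt k s = (Direction.RIGHT, false) := by simp [stAt, dirOf, hs0, h]
      have f2 : (k + 1) % 4 = 1 := by omega
      have f3 : (k + 1) / 4 = k / 4 := by omega
      rw [hst]
      simp only [generateStep]
      split_ifs <;>
        simp_all [posOf, segStart, vec, stAt, dirOf, next_dir, Direction.value, segLen,
          Prod.mk.injEq, f2, f3] <;>
        omega
    · have hst : stAt k s = (Direction.TOP, false) := by simp [stAt, dirOf, hs0, h]
      have f2 : (k + 1) % 4 = 2 := by omega
      have f3 : (k + 1) / 4 = k / 4 := by omega
      rw [hst]
      simp only [generateStep]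
      split_ifs <;>
        simp_all [posOf, segStart, vec, stAt, dirOf, next_dir, Direction.value, segLen,
          Prod.mk.injEq, f2, f3] <;>
        omega
    · have hst : stAt k s = (Direction.LEFT, false) := by simp [stAt, dirOf, hs0, h]
      have f2 : (k + 1) % 4 = 3 := by omega
      have f3 : (k + 1) / 4 = k / 4 := by omega
      rw [hst]
      simp only [generateStep]
      split_ifs <;>
        simp_all [posOf, segStart, vec, stAt, dirOf, next_dir, Direction.value, segLen,
          Prod.mk.injEq, f2, f3] <;>
        omega
    · have hst : stAt k s = (Direction.BOT, false) := by simp [stAt, dirOf, hs0, h]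
      have f2 : (k + 1) % 4 = 0 := by omega
      have f3 : (k + 1) / 4 = k / 4 + 1 := by omega
      rw [hst]
      simp only [generateStep]
      split_ifs <;>
        simp_all [posOf, segStart, vec, stAt, dirOf, next_dir, Direction.value, segLen,
          Prod.mk.injEq, f2, f3] <;>
        omega

lemma idx_succ (i0 : Int) (n : Nat) : idx i0 (n + 1) = i0 :: idx (i0 + 1) n := by
  simp only [idx, List.range_succ_eq_map, List.map_cons, List.map_map, List.cons.injEq]
  constructor
  · simp
  · apply List.map_congr_left
    intro j _
    simp [Function.comp]
    push_cast
    ring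

lemma ents_succ (k s : Nat) (i0 : Int) (n : Nat) :
    ents k s i0 (n + 1) = (i0, posOf k s) :: ents k (s + 1) (i0 + 1) n := by
  simp only [ents, List.range_succ_eq_map, List.map_cons, List.map_map, List.cons.injEq]
  constructor
  · simp
  · apply List.map_congr_left
    intro j _
    simp only [Function.comp, Prod.mk.injEq]
    constructor
    · push_cast; ring
    · congr 1; omega

lemma idx_add (i0 : Int) (a b : Nat) : idx i0 (a + b) = idx i0 a ++ idx (i0 + (a : Int)) b := by
  simp only [idx, List.range_add, List.map_append, List.map_map]
  congr 1
  apply List.map_congr_left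
  intro j _
  simp [Function.comp]
  push_cast
  ring

lemma inner (n : Nat) : ∀ (k s : Nat) (l : PySem.Dict Int (Int × Int)) (i0 : Int),
    s < segLen k → s + n ≤ segLen k →
    ((idx i0 n).foldl generateStep (l, posOf k s, (stAt k s).1, (stAt k s).2)) =
      (insRun l (ents k s i0 n),
       posOf (if s + n < segLen k then k else k + 1) (if s + n < segLen k then s + n else 0),
       (stAt (if s + n < segLen k then k else k + 1) (if s + n < segLen k then s + n else 0)).1,
       (stAt (if s + n < segLen k then k else k + 1) (if s + n < segLen k then s + n else 0)).2) := by
  induction n with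
  | zero =>
    intro k s l i0 hs _
    simp [idx, ents, insRun, hs]
  | succ n ih =>
    intro k s l i0 hs hsn
    rw [idx_succ, ents_succ]
    simp only [List.foldl_cons, insRun, List.foldl_cons]
    rw [entry_step k s hs l i0]
    by_cases hlt : s + 1 < segLen k
    · simp only [if_pos hlt]
      have h2 : s + 1 + n ≤ segLen k := by omega
      have hrec := ih k (s + 1) (l.insert i0 (posOf k s)) (i0 + 1) hlt h2
      simp only [insRun] at hrec
      rw [hrec]
      have e : s + 1 + n = s + (n + 1) := by omega
      rw [e]
    · have hn0 : n = 0 := by omega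
      subst hn0
      have hge : ¬ (s + (0 + 1) < segLen k) := by omega
      simp only [if_neg hlt, if_neg hge]
      simp [idx, ents, insRun]

lemma insRun_ents (k i n : Nat) (l : PySem.Dict Int (Int × Int)) :
    insRun l (ents k 0 ((i : Int) + 1) n) =
      (List.range n).foldl
        (fun (l : PySem.Dict Int (Int × Int)) (s : Nat) =>
          l.insert ((i : Int) + (s : Int) + 1)
            ((segStart k).1 + (s : Int) * (vec (k % 4)).1,
             (segStart k).2 + (s : Int) * (vec (k % 4)).2)) l := by
  simp only [insRun, ents, List.foldl_map]
  congr 1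
  funext l j
  have e1 : (i : Int) + 1 + (j : Int) = (i : Int) + (j : Int) + 1 := by ring
  have e2 : posOf k (0 + j) =
      ((segStart k).1 + (j : Int) * (vec (k % 4)).1,
       (segStart k).2 + (j : Int) * (vec (k % 4)).2) := by
    simp [posOf]
  rw [e1, e2]

lemma outer (rem : Nat) : ∀ (k i : Nat) (l : PySem.Dict Int (Int × Int)) (max : Int),
    rem = (max - (i : Int)).toNat →
    ((idx ((i : Int) + 1) rem).foldl generateStep
        (l, posOf k 0, (stAt k 0).1, (stAt k 0).2)).1 =
      bLoop max l i k (segStart k).1 (segStart k).2 := by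
  induction rem using Nat.strong_induction_on with
  | _ rem ih =>
    intro k i l max hrem
    rw [bLoop]
    by_cases hlt : (i : Int) < max
    · rw [dif_pos hlt]
      have hd : (dirsB[k % 4]!) = vec (k % 4) := by
        have h4 : k % 4 = 0 ∨ k % 4 = 1 ∨ k % 4 = 2 ∨ k % 4 = 3 := by omega
        obtain h | h | h | h := h4 <;> simp [dirsB, vec, h]
      have hr : (max - (i : Int)).toNat = rem := hrem.symm
      simp only [hd, hr]
      set N := min (k / 2 + 1) rem with hN
      have hNseg : N = min (segLen k) rem := by simp [segLen, hN]
      have hrem_split : rem = N + (rem - N) := by omega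
      rw [hrem_split, idx_add, List.foldl_append]
      have h0 : (0 : Nat) < segLen k := by unfold segLen; omega
      have hle : 0 + N ≤ segLen k := by omega
      rw [inner N k 0 l ((i : Int) + 1) h0 hle]
      rw [insRun_ents k i N l]
      by_cases hcase : segLen k ≤ rem
      · have hNval : N = segLen k := by omega
        have hcond : ¬ (0 + N < segLen k) := by omega
        simp only [if_neg hcond]
        have hx1 : (segStart k).1 + ((k / 2 + 1 : Nat) : Int) * (vec (k % 4)).1
            = (segStart (k + 1)).1 := by
          rw [segStart_succ]; simp [posOf, segLen]
        have hx2 : (segStart k).2 + ((k / 2 + 1 : Nat) : Int) * (vec (k % 4)).2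
            = (segStart (k + 1)).2 := by
          rw [segStart_succ]; simp [posOf, segLen]
        rw [hx1, hx2]
        have hlt' : rem - N < rem := by
          have : 1 ≤ N := by unfold segLen at hNval; omega
          omega
        have hrem' : rem - N = (max - ((i + N : Nat) : Int)).toNat := by
          push_cast
          omega
        have hrec := ih (rem - N) hlt' (k + 1) (i + N)
          ((List.range N).foldl
            (fun (l : PySem.Dict Int (Int × Int)) (s : Nat) =>
              l.insert ((i : Int) + (s : Int) + 1)
                ((segStart k).1 + (s : Int) * (vec (k % 4)).1,
                 (segStart k).2 + (s : Int) * (vec (k % 4)).2)) l)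
          max hrem'
        have eidx : (((i + N : Nat) : Int) + 1) = ((i : Int) + 1 + (N : Int)) := by push_cast; ring
        rw [eidx] at hrec
        exact hrec
      · have hNval : N = rem := by omega
        have hcond : 0 + N < segLen k := by omega
        simp only [if_pos hcond]
        have hz : rem - N = 0 := by omega
        rw [hz]
        simp only [idx, List.range_zero, List.map_nil, List.foldl_nil]
        rw [bLoop]
        have hstop : ¬ (((i + N : Nat) : Int) < max) := by
          push_cast
          omega
        rw [dif_neg hstop]
    · rw [dif_neg hlt]
      have h0 : rem = 0 := by omega
      subst h0
      simp [idx]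

theorem generate_spec_aux (max : Int) : generate max = generate_alt max := by
  unfold generate generate_alt
  rw [PySem.List.pyRange_one]
  have hrem : max.toNat = (max - ((0 : Nat) : Int)).toNat := by omega
  have h := outer (max.toNat) 0 0 PySem.Dict.empty max hrem
  simp only [idx, posOf, segStart, vec, stAt, dirOf, segLen] at h
  norm_num at h
  have e2 : (max + 1 - 1).toNat = max.toNat := by omega
  rw [e2]
  norm_num
  exact congrArg PySem.Dict.items h

-- ===== VERDICT (by name: the statement is the Claim_ definition above) =====
theorem generate_spec : Claim_equal_generate := by
  intro max _
  exact generate_spec_aux max
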